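-- pv_equiv track=rewrite | github.com/stefantaubert/dict-from-dragonmapper | src/dict_from_dragonmapper/ipa2symb.py | merge_left_core
-- ===== SOURCE A (Python) =====
-- from typing import Iterable, List, Optional, Set, Tuple
--
-- def merge_left_core(symbols: Tuple[str, ...], merge_symbols: Set[str], ignore_merge_symbols: Set[str]) -> Tuple[Tuple[str, ...]]:
--   j = 0
--   reversed_symbols = symbols[::-1]
--   reversed_merged_symbols = []
--   while j < len(reversed_symbols):
--     new_symbol, j = get_next_merged_left_symbol_and_index(
--       reversed_symbols, j, merge_symbols, ignore_merge_symbols)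
--     reversed_merged_symbols.append(new_symbol)
--   merged_symbols = reversed_merged_symbols[::-1]
--   return tuple(merged_symbols)
--
-- def get_next_merged_left_symbol_and_index(symbols: Tuple[str, ...], j: int, merge_symbols: Set[str], ignore_merge_symbols: Set[str]) -> Tuple[str, int]:
--   new_symbol = [symbols[j]]
--   j += 1
--   if new_symbol[0] not in ignore_merge_symbols and new_symbol[0] not in merge_symbols:
--     while j < len(symbols) and symbols[j] in merge_symbols:
--       new_symbol.insert(0, symbols[j])
--       j += 1
--   return tuple(new_symbol), j
-- ===== SOURCE B (Python) =====
-- def merge_left_core(symbols, merge_symbols, ignore_merge_symbols):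
--   groups = []
--   pending = []  # consecutive merge symbols awaiting a core to their right
--   for s in symbols:
--     if s in merge_symbols:
--       pending.append(s)
--     elif s not in ignore_merge_symbols:
--       groups.append(tuple(pending + [s]))
--       pending = []
--     else:
--       groups.extend((m,) for m in pending)
--       groups.append((s,))
--       pending = []
--   groups.extend((m,) for m in pending)
--   return tuple(groups)
-- ===== Notes on version B (the rewrite author's own statement) =====
-- stated objective: simpler
-- what changed: Replaces A's reverse-the-tuple / index-driven helper walk / reverse-again with a single left-to-right scan that buffers consecutive merge symbols in a pending list and attaches them to the next normal core symbol (flushing them as singletons before an ignore symbol or at the end).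
import Mathlib
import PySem

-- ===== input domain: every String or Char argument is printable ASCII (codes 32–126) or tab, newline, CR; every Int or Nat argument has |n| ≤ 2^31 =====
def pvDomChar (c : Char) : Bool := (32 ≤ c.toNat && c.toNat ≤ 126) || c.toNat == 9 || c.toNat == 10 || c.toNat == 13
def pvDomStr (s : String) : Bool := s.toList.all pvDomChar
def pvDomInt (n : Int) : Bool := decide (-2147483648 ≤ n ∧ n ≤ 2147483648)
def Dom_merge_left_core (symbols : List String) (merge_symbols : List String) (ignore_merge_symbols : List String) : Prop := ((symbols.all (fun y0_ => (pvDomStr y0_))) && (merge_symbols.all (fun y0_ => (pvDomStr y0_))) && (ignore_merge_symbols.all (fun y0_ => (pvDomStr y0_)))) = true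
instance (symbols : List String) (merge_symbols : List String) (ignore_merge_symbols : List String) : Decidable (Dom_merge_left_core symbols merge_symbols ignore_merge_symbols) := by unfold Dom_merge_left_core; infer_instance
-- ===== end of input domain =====

-- B replaces A's reverse / index-walk / reverse with one forward scan holding a pending
-- buffer of merge symbols (objective: simpler).


-- ===== PORT A =====
-- inner while loop of get_next_merged_left_symbol_and_index: absorbs merge symbols,
-- inserting each at position 0 of the group (new_symbol.insert(0, symbols[j])).
-- fuel = symbols.length bounds the loop (j grows by 1 each step): totality guard only.
def mlcInner (symbols : List String) (fuel : Nat) (j : Nat) (group : List String) (merge_symbols : List String) : List String × Nat :=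
  match fuel with
  | 0 => (group, j)
  | fuel + 1 =>
    if j < symbols.length ∧ symbols.getD j "" ∈ merge_symbols then
      mlcInner symbols fuel (j + 1) (symbols.getD j "" :: group) merge_symbols
    else (group, j)

-- get_next_merged_left_symbol_and_index
def mlcGetNext (symbols : List String) (j : Nat) (merge_symbols ignore_merge_symbols : List String) : List String × Nat :=
  let s := symbols.getD j ""   -- symbols[j]: every call site guarantees j < symbols.length
  if s ∉ ignore_merge_symbols ∧ s ∉ merge_symbols then
    mlcInner symbols symbols.length (j + 1) [s] merge_symbols
  else ([s], j + 1)

-- the while loop in merge_left_core, accumulating reversed_merged_symbols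
-- (fuel = symbols.length again only makes the loop total; j advances every iteration)
def mlcLoop (symbols : List String) (fuel : Nat) (j : Nat) (acc : List (List String)) (ms ig : List String) : List (List String) :=
  match fuel with
  | 0 => acc
  | fuel + 1 =>
    if j < symbols.length then
      mlcLoop symbols fuel (mlcGetNext symbols j ms ig).2 (acc ++ [(mlcGetNext symbols j ms ig).1]) ms ig
    else acc

def merge_left_core (symbols : List String) (merge_symbols : List String) (ignore_merge_symbols : List String) : List (List String) :=
  -- symbols[::-1] is List.reverse (PySem.List.slice?_none_none_neg_one)
  let reversedSymbols := symbols.reverse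
  (mlcLoop reversedSymbols reversedSymbols.length 0 [] merge_symbols ignore_merge_symbols).reverse

-- ===== PORT B =====
def mlcAltLoop (xs : List String) (pending : List String) (groups : List (List String)) (ms ig : List String) : List (List String) :=
  match xs with
  | [] => groups ++ pending.map (fun m => [m])
  | s :: rest =>
    if s ∈ ms then mlcAltLoop rest (pending ++ [s]) groups ms ig
    else if s ∉ ig then mlcAltLoop rest [] (groups ++ [pending ++ [s]]) ms ig
    else mlcAltLoop rest [] (groups ++ pending.map (fun m => [m]) ++ [[s]]) ms ig

def merge_left_core_alt (symbols : List String) (merge_symbols : List String) (ignore_merge_symbols : List String) : List (List String) :=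
  mlcAltLoop symbols [] [] merge_symbols ignore_merge_symbols

-- ===== PRECONDITION & SPEC =====
def Spec_merge_left_core (symbols : List String) (merge_symbols : List String) (ignore_merge_symbols : List String) (out : List (List String)) : Prop := out = merge_left_core_alt symbols merge_symbols ignore_merge_symbols
instance (symbols : List String) (merge_symbols : List String) (ignore_merge_symbols : List String) (out : List (List String)) : Decidable (Spec_merge_left_core symbols merge_symbols ignore_merge_symbols out) := by unfold Spec_merge_left_core; infer_instance

-- ===== CLAIM (what is proved, stated in full; the proofs are below) =====
def Claim_equal_merge_left_core : Prop := ∀ (symbols : List String) (merge_symbols : List String) (ignore_merge_symbols : List String), Dom_merge_left_core symbols merge_symbols ignore_merge_symbols → Spec_merge_left_core symbols merge_symbols ignore_merge_symbols (merge_left_core symbols merge_symbols ignore_merge_symbols)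

-- ===== LEMMAS AND PROOFS =====

-- canonical form both ports are reduced to: split the leading run of merge symbols
def mlcSpec (ms ig : List String) (xs : List String) : List (List String) :=
  match h : xs.dropWhile (fun s => decide (s ∈ ms)) with
  | [] => xs.map (fun m => [m])
  | s :: rest =>
    if s ∈ ig then
      (xs.takeWhile (fun s => decide (s ∈ ms))).map (fun m => [m]) ++ [s] :: mlcSpec ms ig rest
    else
      (xs.takeWhile (fun s => decide (s ∈ ms)) ++ [s]) :: mlcSpec ms ig rest
termination_by xs.length
decreasing_by
  all_goals
    have hle := xs.length_dropWhile_le (fun s => decide (s ∈ ms))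
    rw [h] at hle; simp at hle; omega

-- l.drop (l.takeWhile p).length = l.dropWhile p
theorem pvDropTakeWhileLength (p : String → Bool) (l : List String) :
    l.drop (l.takeWhile p).length = l.dropWhile p := by
  induction l with
  | nil => rfl
  | cons a t ih => by_cases h : p a <;> simp [List.dropWhile_cons, h, ih]

-- A's scan of the reversed list, list-based
def mlcScan (ms ig : List String) (ys : List String) : List (List String) :=
  match ys with
  | [] => []
  | h :: t =>
    if h ∉ ig ∧ h ∉ ms then
      ((t.takeWhile (fun s => decide (s ∈ ms))).reverse ++ [h]) ::
        mlcScan ms ig (t.dropWhile (fun s => decide (s ∈ ms)))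
    else [h] :: mlcScan ms ig t
termination_by ys.length
decreasing_by
  · have := t.length_dropWhile_le (fun s => decide (s ∈ ms)); simp; omega
  · simp

theorem mlcSpec_nil (ms ig : List String) : mlcSpec ms ig [] = [] := by
  rw [mlcSpec.eq_def]; simp

theorem mlcSpec_all_merge (ms ig : List String) (xs : List String)
    (h : ∀ s ∈ xs, s ∈ ms) : mlcSpec ms ig xs = xs.map (fun m => [m]) := by
  have hd : xs.dropWhile (fun s => decide (s ∈ ms)) = [] := by
    rw [List.dropWhile_eq_nil_iff]; intro x hx; simpa using h x hx
  rw [mlcSpec.eq_def]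
  split
  · rfl
  next s rest heq => rw [hd] at heq; cases heq

theorem mlcSpec_cons_core (ms ig : List String) (pending : List String) (s : String) (rest : List String)
    (hp : ∀ x ∈ pending, x ∈ ms) (hs : s ∉ ms) :
    mlcSpec ms ig (pending ++ s :: rest) =
      if s ∈ ig then pending.map (fun m => [m]) ++ [s] :: mlcSpec ms ig rest
      else (pending ++ [s]) :: mlcSpec ms ig rest := by
  have hp' : ∀ x ∈ pending, (fun s => decide (s ∈ ms)) x = true := by
    intro x hx; simpa using hp x hx
  have hs' : decide (s ∈ ms) = false := by simpa using hs
  have hdrop : (pending ++ s :: rest).dropWhile (fun s => decide (s ∈ ms)) = s :: rest := by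
    rw [List.dropWhile_append_of_pos hp', List.dropWhile_cons, hs']; simp
  have htake : (pending ++ s :: rest).takeWhile (fun s => decide (s ∈ ms)) = pending := by
    rw [List.takeWhile_append_of_pos hp', List.takeWhile_cons, hs']; simp
  rw [mlcSpec.eq_def]
  split
  next heq => rw [hdrop] at heq; cases heq
  next s' rest' heq =>
    rw [hdrop] at heq
    obtain ⟨rfl, rfl⟩ : s = s' ∧ rest = rest' := by simpa using heq
    rw [htake]

theorem mlcAltLoop_eq (ms ig : List String) (xs pending : List String) (groups : List (List String))
    (hp : ∀ x ∈ pending, x ∈ ms) :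
    mlcAltLoop xs pending groups ms ig = groups ++ mlcSpec ms ig (pending ++ xs) := by
  induction xs generalizing pending groups with
  | nil => simp [mlcAltLoop, mlcSpec_all_merge ms ig pending hp]
  | cons s rest ih =>
    rw [mlcAltLoop]
    by_cases h1 : s ∈ ms
    · rw [if_pos h1, ih (pending ++ [s]) groups]
      · simp
      · intro x hx
        rcases List.mem_append.mp hx with hx | hx
        · exact hp x hx
        · simp at hx; subst hx; exact h1
    · rw [if_neg h1]
      rw [mlcSpec_cons_core ms ig pending s rest hp h1]
      by_cases h2 : s ∈ ig
      · rw [if_neg (by simpa using h2), if_pos h2, ih [] _ (by simp)]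
        simp
      · rw [if_pos h2, if_neg h2, ih [] _ (by simp)]
        simp

-- appending a trailing merge/ignore symbol adds a singleton group
theorem mlcSpec_append_standalone (ms ig : List String) (w : List String) (h : String)
    (hh : h ∈ ms ∨ h ∈ ig) :
    mlcSpec ms ig (w ++ [h]) = mlcSpec ms ig w ++ [[h]] := by
  match hd : w.dropWhile (fun s => decide (s ∈ ms)) with
  | [] =>
    have hall : ∀ s ∈ w, s ∈ ms := by
      intro x hx
      have := (List.dropWhile_eq_nil_iff.mp hd) x hx
      simpa using this
    rw [mlcSpec_all_merge ms ig w hall]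
    by_cases hm : h ∈ ms
    · rw [mlcSpec_all_merge ms ig (w ++ [h]) (by intro x hx; rcases List.mem_append.mp hx with hx | hx; exact hall x hx; simp at hx; subst hx; exact hm)]
      simp
    · have hig : h ∈ ig := hh.resolve_left hm
      rw [mlcSpec_cons_core ms ig w h [] hall hm, if_pos hig, mlcSpec_nil]
  | s :: rest =>
    have hw : w = w.takeWhile (fun s => decide (s ∈ ms)) ++ s :: rest := by
      conv_lhs => rw [← List.takeWhile_append_dropWhile (p := fun s => decide (s ∈ ms)) (l := w)]
      rw [hd]
    have hsm : s ∉ ms := by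
      have := List.head?_dropWhile_not (fun s => decide (s ∈ ms)) w
      rw [hd] at this; simpa using this
    have htm : ∀ x ∈ w.takeWhile (fun s => decide (s ∈ ms)), x ∈ ms := by
      intro x hx; simpa using List.mem_takeWhile_imp hx
    have hlen : rest.length < w.length := by
      conv_rhs => rw [hw]
      simp only [List.length_append, List.length_cons]; omega
    have ih := mlcSpec_append_standalone ms ig rest h hh
    conv_lhs => rw [hw, List.append_assoc]
    rw [List.cons_append, mlcSpec_cons_core ms ig _ s (rest ++ [h]) htm hsm, ih]
    conv_rhs => rw [hw, mlcSpec_cons_core ms ig _ s rest htm hsm]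
    by_cases hig : s ∈ ig
    · rw [if_pos hig, if_pos hig]; simp
    · rw [if_neg hig, if_neg hig]; simp
termination_by w.length

-- appending run ++ [core] adds one group, provided w does not end in a merge symbol
theorem mlcSpec_append_group (ms ig : List String) (w r : List String) (h : String)
    (hm : h ∉ ms) (hi : h ∉ ig) (hr : ∀ x ∈ r, x ∈ ms)
    (hw : ∀ x, w.getLast? = some x → x ∉ ms) :
    mlcSpec ms ig (w ++ (r ++ [h])) = mlcSpec ms ig w ++ [r ++ [h]] := by
  match hd : w.dropWhile (fun s => decide (s ∈ ms)) with
  | [] =>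
    have hall : ∀ s ∈ w, s ∈ ms := by
      intro x hx
      have := (List.dropWhile_eq_nil_iff.mp hd) x hx
      simpa using this
    have hwnil : w = [] := by
      cases w with
      | nil => rfl
      | cons a t =>
        exact absurd (hall _ (List.getLast_mem (by simp)))
          (hw _ (List.getLast?_eq_some_getLast (l := a :: t) (by simp)))
    subst hwnil
    rw [mlcSpec_nil]
    rw [List.nil_append, mlcSpec_cons_core ms ig r h [] hr hm, if_neg hi, mlcSpec_nil]
    simp
  | s :: rest =>
    have hweq : w = w.takeWhile (fun s => decide (s ∈ ms)) ++ s :: rest := by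
      conv_lhs => rw [← List.takeWhile_append_dropWhile (p := fun s => decide (s ∈ ms)) (l := w)]
      rw [hd]
    have hsm : s ∉ ms := by
      have := List.head?_dropWhile_not (fun s => decide (s ∈ ms)) w
      rw [hd] at this; simpa using this
    have htm : ∀ x ∈ w.takeWhile (fun s => decide (s ∈ ms)), x ∈ ms := by
      intro x hx; simpa using List.mem_takeWhile_imp hx
    have hlen : rest.length < w.length := by
      conv_rhs => rw [hweq]
      simp only [List.length_append, List.length_cons]; omega
    have hwrest : ∀ x, rest.getLast? = some x → x ∉ ms := by
      intro x hx
      apply hw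
      rw [hweq, List.getLast?_append_of_ne_nil _ (by simp : s :: rest ≠ [])]
      rw [show s :: rest = [s] ++ rest from rfl,
        List.getLast?_append_of_ne_nil _ (by rintro rfl; cases hx)]
      exact hx
    have ih := mlcSpec_append_group ms ig rest r h hm hi hr hwrest
    conv_lhs => rw [hweq, List.append_assoc]
    rw [List.cons_append, mlcSpec_cons_core ms ig _ s (rest ++ (r ++ [h])) htm hsm, ih]
    conv_rhs => rw [hweq, mlcSpec_cons_core ms ig _ s rest htm hsm]
    by_cases hig : s ∈ ig
    · rw [if_pos hig, if_pos hig]; simp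
    · rw [if_neg hig, if_neg hig]; simp
termination_by w.length

theorem mlcScan_eq (ms ig : List String) (ys : List String) :
    mlcScan ms ig ys = (mlcSpec ms ig ys.reverse).reverse := by
  match ys with
  | [] => rw [mlcScan, List.reverse_nil, mlcSpec_nil]; rfl
  | h :: t =>
    rw [mlcScan]
    have htt : t = t.takeWhile (fun s => decide (s ∈ ms)) ++ t.dropWhile (fun s => decide (s ∈ ms)) :=
      (List.takeWhile_append_dropWhile).symm
    by_cases hc : h ∉ ig ∧ h ∉ ms
    · rw [if_pos hc]
      have htm : ∀ x ∈ (t.takeWhile (fun s => decide (s ∈ ms))).reverse, x ∈ ms := by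
        intro x hx; rw [List.mem_reverse] at hx; simpa using List.mem_takeWhile_imp hx
      have hwlast : ∀ x, (t.dropWhile (fun s => decide (s ∈ ms))).reverse.getLast? = some x → x ∉ ms := by
        intro x hx
        rw [List.getLast?_reverse] at hx
        have := List.head?_dropWhile_not (fun s => decide (s ∈ ms)) t
        rw [hx] at this; simpa using this
      have hgrp := mlcSpec_append_group ms ig
        (t.dropWhile (fun s => decide (s ∈ ms))).reverse
        (t.takeWhile (fun s => decide (s ∈ ms))).reverse h hc.2 hc.1 htm hwlast
      have hlen : (t.dropWhile (fun s => decide (s ∈ ms))).length ≤ t.length :=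
        t.length_dropWhile_le _
      have ih := mlcScan_eq ms ig (t.dropWhile (fun s => decide (s ∈ ms)))
      rw [ih]
      conv_rhs => rw [List.reverse_cons, htt, List.reverse_append, List.append_assoc, hgrp]
      rw [List.reverse_append]
      rfl
    · rw [if_neg hc]
      push_neg at hc
      have hh : h ∈ ms ∨ h ∈ ig := by
        by_cases hig : h ∈ ig
        · exact Or.inr hig
        · exact Or.inl (hc hig)
      have ih := mlcScan_eq ms ig t
      rw [ih]
      conv_rhs => rw [List.reverse_cons, mlcSpec_append_standalone ms ig t.reverse h hh]
      rw [List.reverse_append]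
      rfl
termination_by ys.length
decreasing_by
  · simp only [List.length_cons]; omega
  · simp

theorem mlcInner_snd_ge (symbols : List String) (fuel j : Nat) (group ms : List String) :
    j ≤ (mlcInner symbols fuel j group ms).2 := by
  induction fuel generalizing j group with
  | zero => simp [mlcInner]
  | succ fuel ih =>
    rw [mlcInner]
    split
    · exact le_trans (by omega) (ih (j + 1) _)
    · simp

theorem mlcGetNext_snd_gt (symbols : List String) (j : Nat) (ms ig : List String) :
    j < (mlcGetNext symbols j ms ig).2 := by
  unfold mlcGetNext
  dsimp only
  split
  · have := mlcInner_snd_ge symbols symbols.length (j + 1) [symbols.getD j ""] ms; omega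
  · simp

theorem mlcInner_eq (ms : List String) (symbols : List String) (fuel j : Nat) (group : List String)
    (hfuel : symbols.length - j ≤ fuel) :
    mlcInner symbols fuel j group ms =
      (((symbols.drop j).takeWhile (fun s => decide (s ∈ ms))).reverse ++ group,
        j + ((symbols.drop j).takeWhile (fun s => decide (s ∈ ms))).length) := by
  induction fuel generalizing j group with
  | zero =>
    have hdrop : symbols.drop j = [] := List.drop_eq_nil_of_le (by omega)
    rw [mlcInner, hdrop]
    simp
  | succ fuel ih =>
    rw [mlcInner]
    split
    next h =>
      obtain ⟨hj, hmem⟩ := h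
      have hdrop : symbols.drop j = symbols[j] :: symbols.drop (j + 1) :=
        List.drop_eq_getElem_cons hj
      have hgetD : symbols.getD j "" = symbols[j] := List.getD_eq_getElem symbols "" hj
      rw [ih (j + 1) _ (by omega), hdrop, List.takeWhile_cons, hgetD]
      rw [hgetD] at hmem
      simp [hmem, List.append_assoc]
      omega
    next h =>
      by_cases hj : j < symbols.length
      · have hmem : symbols.getD j "" ∉ ms := fun hm => h ⟨hj, hm⟩
        have hdrop : symbols.drop j = symbols[j] :: symbols.drop (j + 1) :=
          List.drop_eq_getElem_cons hj
        have hgetD : symbols.getD j "" = symbols[j] := List.getD_eq_getElem symbols "" hj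
        rw [hdrop, List.takeWhile_cons]
        rw [hgetD] at hmem
        simp [hmem]
      · have hdrop : symbols.drop j = [] := List.drop_eq_nil_of_le (by omega)
        rw [hdrop]
        simp

theorem mlcLoop_eq (ms ig : List String) (symbols : List String) (fuel j : Nat) (acc : List (List String))
    (hfuel : symbols.length - j ≤ fuel) :
    mlcLoop symbols fuel j acc ms ig = acc ++ mlcScan ms ig (symbols.drop j) := by
  induction fuel generalizing j acc with
  | zero =>
    rw [mlcLoop, List.drop_eq_nil_of_le (by omega), mlcScan]
    simp
  | succ fuel ih =>
    rw [mlcLoop]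
    split
    next hj =>
      have hstep := mlcGetNext_snd_gt symbols j ms ig
      rw [ih _ _ (by omega)]
      have hdrop : symbols.drop j = symbols[j] :: symbols.drop (j + 1) :=
        List.drop_eq_getElem_cons hj
      have hgetD : symbols.getD j "" = symbols[j] := List.getD_eq_getElem symbols "" hj
      rw [List.append_assoc]
      congr 1
      rw [hdrop, mlcScan]
      unfold mlcGetNext
      dsimp only
      rw [hgetD]
      by_cases hc : symbols[j] ∉ ig ∧ symbols[j] ∉ ms
      · rw [if_pos hc, if_pos hc, mlcInner_eq ms symbols _ _ _ (by omega)]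
        have h0 := pvDropTakeWhileLength (fun s => decide (s ∈ ms)) (symbols.drop (j + 1))
        rw [List.drop_drop] at h0
        have hdd : symbols.drop (j + 1 + ((symbols.drop (j + 1)).takeWhile (fun s => decide (s ∈ ms))).length)
            = (symbols.drop (j + 1)).dropWhile (fun s => decide (s ∈ ms)) := by
          rw [← h0]
        rw [hdd]
        rfl
      · rw [if_neg hc, if_neg hc]
        rfl
    next hj =>
      rw [List.drop_eq_nil_of_le (by omega), mlcScan]
      simp

-- ===== VERDICT (by name: the statement is the Claim_ definition above) =====
theorem merge_left_core_spec : Claim_equal_merge_left_core := by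
  intro symbols ms ig _
  unfold Spec_merge_left_core merge_left_core merge_left_core_alt
  dsimp only
  rw [mlcLoop_eq ms ig symbols.reverse symbols.reverse.length 0 [] (by omega), List.drop_zero,
    mlcScan_eq, List.reverse_reverse, mlcAltLoop_eq ms ig symbols [] [] (by simp)]
  simp
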